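-- pv_equiv track=rewrite | github.com/MicSie/adventofcode_2023 | day13/task.py | find_matching_lines
-- ===== SOURCE A (Python) =====
-- def find_matching_lines(lines: list[str]) -> dict[str, list[int, int]]:
--     result = dict()
--     for index, line in enumerate(lines):
--         if line in result:
--             result[line].append(index)
--         else:
--             result[line] = [index]
--     return result
-- ===== SOURCE B (Python) =====
-- def find_matching_lines(lines: list[str]) -> dict[str, list[int]]:
--     # Two-pass: first the distinct lines in first-occurrence order, then
--     # one index-collecting scan per distinct line.
--     return {line: [i for i, l in enumerate(lines) if l == line]
--             for line in dict.fromkeys(lines)}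
-- ===== Notes on version B (the rewrite author's own statement) =====
-- stated objective: simpler
-- what changed: Replaces the incremental dict-building loop (lookup, append-or-create per element) with a dict comprehension over the deduplicated lines, where each key's index list is collected by its own scan of enumerate(lines).
import Mathlib
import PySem

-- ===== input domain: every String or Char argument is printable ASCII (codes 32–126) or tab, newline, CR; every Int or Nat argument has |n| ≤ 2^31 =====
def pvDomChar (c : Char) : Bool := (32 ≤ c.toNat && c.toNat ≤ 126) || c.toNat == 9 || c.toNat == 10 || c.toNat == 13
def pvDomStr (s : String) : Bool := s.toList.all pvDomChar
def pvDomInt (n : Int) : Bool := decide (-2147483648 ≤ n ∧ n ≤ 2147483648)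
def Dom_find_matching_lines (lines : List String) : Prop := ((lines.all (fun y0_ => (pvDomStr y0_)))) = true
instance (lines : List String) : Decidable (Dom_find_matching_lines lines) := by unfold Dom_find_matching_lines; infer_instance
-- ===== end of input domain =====

-- B replaces A's incremental dict-building loop with a comprehension over the
-- deduplicated lines, one index-collecting scan per distinct line ('simpler'; not faster).
-- ===== PORT A =====
def stepA (d : PySem.Dict String (List Int)) (p : Int × String) : PySem.Dict String (List Int) :=
  if d.contains p.2 then d.modify p.2 [] (fun xs => xs ++ [p.1])
  else d.insert p.2 [p.1]

def find_matching_lines (lines : List String) : List (String × List Int) :=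
  ((PySem.List.enumerate lines 0).foldl stepA PySem.Dict.empty).items

-- ===== PORT B =====
def find_matching_lines_alt (lines : List String) : List (String × List Int) :=
  (PySem.List.dedup lines).map (fun line =>
    (line, ((PySem.List.enumerate lines 0).filter (fun p => p.2 == line)).map (·.1)))

-- ===== PRECONDITION & SPEC =====
def Spec_find_matching_lines (lines : List String) (out : List (String × List Int)) : Prop := out = find_matching_lines_alt lines
instance (lines : List String) (out : List (String × List Int)) : Decidable (Spec_find_matching_lines lines out) := by unfold Spec_find_matching_lines; infer_instance

-- ===== CLAIM (what is proved, stated in full; the proofs are below) =====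
def Claim_equal_find_matching_lines : Prop := ∀ (lines : List String), Dom_find_matching_lines lines → Spec_find_matching_lines lines (find_matching_lines lines)

-- ===== LEMMAS AND PROOFS =====

theorem dedup_append_singleton (s : List String) (x : String) :
    PySem.List.dedup (s ++ [x]) = if x ∈ s then PySem.List.dedup s else PySem.List.dedup s ++ [x] := by
  have hmem : x ∈ PySem.List.dedup s ↔ x ∈ s := PySem.List.mem_dedup s x
  simp only [PySem.List.dedup, PySem.Set.ofList, PySem.Set.empty, List.foldl_append,
    List.foldl_cons, List.foldl_nil, PySem.Set.add, PySem.Set.contains, List.contains_eq_mem] at hmem ⊢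
  by_cases h : x ∈ s <;> simp [h, hmem]

theorem contains_mk_map (L : List String) (g : String → List Int) (x : String) :
    (PySem.Dict.mk (L.map (fun l => (l, g l)))).contains x = decide (x ∈ L) := by
  simp [PySem.Dict.contains, List.any_map, Function.comp_def, List.any_beq', List.contains_eq_mem]

theorem get?_mk_map (L : List String) (g : String → List Int) (x : String) (hx : x ∈ L) :
    (PySem.Dict.mk (L.map (fun l => (l, g l)))).get? x = some (g x) := by
  induction L with
  | nil => cases hx
  | cons a L ih =>
    rw [List.map_cons, PySem.Dict.get?_mk_cons]
    by_cases hax : a = x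
    · subst hax; simp
    · have hx' : x ∈ L := by
        cases hx with
        | head => exact absurd rfl hax
        | tail _ h => exact h
      simp [hax, ih hx']

theorem insert_mk_map_of_mem (L : List String) (g : String → List Int) (x : String)
    (v : List Int) (hx : x ∈ L) :
    (PySem.Dict.mk (L.map (fun l => (l, g l)))).insert x v
      = PySem.Dict.mk (L.map (fun l => (l, if l = x then v else g l))) := by
  have hc : (PySem.Dict.mk (L.map (fun l => (l, g l)))).contains x = true := by
    rw [contains_mk_map]; simpa using hx
  simp only [PySem.Dict.insert, hc, if_pos]
  congr 1
  rw [List.map_map]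
  apply List.map_congr_left
  intro l _
  by_cases hlx : l = x
  · subst hlx; simp
  · simp [hlx]

theorem insert_mk_map_of_not_mem (L : List String) (g : String → List Int) (x : String)
    (v : List Int) (hx : x ∉ L) :
    (PySem.Dict.mk (L.map (fun l => (l, g l)))).insert x v
      = PySem.Dict.mk ((L ++ [x]).map (fun l => (l, if l = x then v else g l))) := by
  have hc : (PySem.Dict.mk (L.map (fun l => (l, g l)))).contains x = false := by
    rw [contains_mk_map]; simpa using hx
  simp only [PySem.Dict.insert, hc, Bool.false_eq_true, if_neg, not_false_eq_true]
  congr 1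
  rw [List.map_append, List.map_singleton, if_pos rfl]
  congr 1
  apply (List.map_congr_left ?_).symm
  intro l hl
  have : l ≠ x := fun h => hx (h ▸ hl)
  simp [this]

theorem foldA_invariant (xs : List String) (n : Int) (s : List String) (g : String → List Int) :
    ((PySem.List.enumerate xs n).foldl stepA ⟨(PySem.List.dedup s).map (fun l => (l, g l))⟩).items
    = (PySem.List.dedup (s ++ xs)).map (fun l =>
        (l, (if l ∈ s then g l else []) ++
            ((PySem.List.enumerate xs n).filter (fun p => p.2 == l)).map (·.1))) := by
  induction xs generalizing n s g with
  | nil =>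
    simp only [PySem.List.enumerate_nil, List.foldl_nil, List.filter_nil, List.map_nil,
      List.append_nil]
    apply (List.map_congr_left ?_).symm
    intro l hl
    rw [if_pos ((PySem.List.mem_dedup s l).1 hl)]
  | cons x xs' ih =>
    rw [PySem.List.enumerate_cons, List.foldl_cons]
    -- the new per-key value function after processing (n, x)
    set g' : String → List Int :=
      fun l => if l = x then (if x ∈ s then g x ++ [n] else [n]) else g l with hg'
    have hstep : stepA ⟨(PySem.List.dedup s).map (fun l => (l, g l))⟩ (n, x)
        = ⟨(PySem.List.dedup (s ++ [x])).map (fun l => (l, g' l))⟩ := by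
      by_cases hx : x ∈ s
      · have hxd : x ∈ PySem.List.dedup s := (PySem.List.mem_dedup s x).2 hx
        simp only [stepA, contains_mk_map, hxd, decide_true, if_pos, PySem.Dict.modify,
          PySem.Dict.getD, get?_mk_map _ _ _ hxd, Option.getD_some,
          insert_mk_map_of_mem _ _ _ _ hxd, dedup_append_singleton, hx, hg']
      · have hxd : x ∉ PySem.List.dedup s := fun h => hx ((PySem.List.mem_dedup s x).1 h)
        simp only [stepA, contains_mk_map, hxd, decide_false, Bool.false_eq_true, if_neg,
          not_false_eq_true, insert_mk_map_of_not_mem _ _ _ _ hxd,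
          dedup_append_singleton, hx, hg']
    rw [hstep, ih (n + 1) (s ++ [x]) g', List.append_assoc, List.singleton_append]
    congr 1
    funext l
    by_cases hlx : l = x
    · subst hlx
      by_cases hls : l ∈ s <;> simp [hg', hls]
    · have hne : (x == l) = false := by simpa using Ne.symm hlx
      simp [hg', hlx, hne]

-- ===== VERDICT (by name: the statement is the Claim_ definition above) =====
theorem find_matching_lines_spec : Claim_equal_find_matching_lines := by
  intro lines _
  show _ = _
  have h := foldA_invariant lines 0 [] (fun _ => [])
  simpa [find_matching_lines, find_matching_lines_alt, PySem.Dict.empty] using h
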